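-- pv_equiv track=rewrite | github.com/SurTan02/Tucil3_13520059 | src/solver.py | Kurang
-- ===== SOURCE A (Python) =====
-- def Position(mtrx, value):
--     for i in range(4):
--         for j in range(4):
--             if value == mtrx[i][j]:
--                 return [i,j]
--
-- def Kurang(mtrx, num):
--     count = 0
--     posisi = Position(mtrx, num)
--
--     for j in range (posisi[1], 4):
--         if (num > mtrx[posisi[0]][j]):
--             count+=1
--
--     for i in range (posisi[0]+1, 4):
--         for j in range(4):
--
--             if (num > mtrx[i][j]):
--                 count+=1
--     return count
-- ===== SOURCE B (Python) =====
-- def _step(st, num, x):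
--     seen, count = st
--     if seen and num > x:
--         return (seen, count + 1)
--     if not seen and x == num:
--         return (True, count)
--     return st
--
-- def Kurang(mtrx, num):
--     st = (False, 0)
--     for i in range(4):
--         for j in range(4):
--             st = _step(st, num, mtrx[i][j])
--     return st[1]
-- ===== Notes on version B (the rewrite author's own statement) =====
-- stated objective: alternative
-- what changed: Replaces A's two-phase locate-then-count (Position helper search followed by two separate counting loops over the row remainder and the later rows) with a single streaming pass over the 4x4 cells carrying a seen-flag accumulator: counting starts only once num has been seen, so no position is ever computed.
import Mathlib
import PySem

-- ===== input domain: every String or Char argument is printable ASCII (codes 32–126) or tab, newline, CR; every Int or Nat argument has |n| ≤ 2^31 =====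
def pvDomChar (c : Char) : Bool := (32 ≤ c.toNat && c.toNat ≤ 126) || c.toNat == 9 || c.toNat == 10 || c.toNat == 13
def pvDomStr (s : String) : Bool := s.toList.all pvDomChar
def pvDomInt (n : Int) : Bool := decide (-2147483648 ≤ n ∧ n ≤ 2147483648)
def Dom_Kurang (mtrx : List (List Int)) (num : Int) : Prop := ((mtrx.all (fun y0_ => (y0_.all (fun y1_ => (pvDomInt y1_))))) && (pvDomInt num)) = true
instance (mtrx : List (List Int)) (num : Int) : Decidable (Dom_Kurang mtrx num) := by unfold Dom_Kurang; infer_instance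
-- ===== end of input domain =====

-- B replaces A's locate-then-count two-phase scheme (Position search plus two separate
-- counting loops) with a single streaming pass over the 4x4 cells carrying a seen-flag
-- state: counting starts once num is seen, no position is ever computed (alternative).

-- ===== PORT A =====
-- mtrx[i][j] with the nonnegative literal indices A uses; Python raises IndexError when out
-- of range — those inputs are excluded by Pre_Kurang, the default is never returned there.
def cellA (mtrx : List (List Int)) (i j : Nat) : Int :=
  (mtrx.getD i []).getD j 0

-- 'for i in range(4): for j in range(4): if value == mtrx[i][j]: return [i,j]' —
-- first match in row-major order; none = Python's implicit 'return None'.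
def Position (mtrx : List (List Int)) (value : Int) : Option (Nat × Nat) :=
  ((List.range 4).flatMap (fun i => (List.range 4).map (fun j => (i, j)))).find?
    (fun p => decide (value = cellA mtrx p.1 p.2))

def Kurang (mtrx : List (List Int)) (num : Int) : Int :=
  match Position mtrx num with
  | none => 0   -- Python: TypeError (subscripting None); excluded by Pre_Kurang
  | some (pi, pj) =>
      let count := (List.range' pj (4 - pj)).foldl
        (fun c j => if num > cellA mtrx pi j then c + 1 else c) (0 : Int)
      (List.range' (pi + 1) (4 - (pi + 1))).foldl
        (fun c i => (List.range 4).foldl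
          (fun c j => if num > cellA mtrx i j then c + 1 else c) c) count

-- ===== PORT B =====
-- same indexing primitive, kept separate so each port stands on its own
def cellB (mtrx : List (List Int)) (i j : Nat) : Int :=
  (mtrx.getD i []).getD j 0

-- Source B's _step: state = (seen, count); two ifs, then the unchanged state
def stepB (st : Bool × Int) (num x : Int) : Bool × Int :=
  if st.1 && decide (num > x) then (st.1, st.2 + 1)
  else if !st.1 && (x == num) then (true, st.2)
  else st

-- single pass over the 16 cells threading the (seen, count) state, as in Source B
def Kurang_alt (mtrx : List (List Int)) (num : Int) : Int :=
  ((List.range 4).foldl (fun st i =>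
    (List.range 4).foldl (fun st j => stepB st num (cellB mtrx i j)) st)
    ((false, (0 : Int)))).2

-- ===== PRECONDITION & SPEC =====
-- Exactly the inputs where A returns: the first four rows exist and have ≥ 4 entries
-- (else IndexError in Position or in the counting loops) and num occurs in that 4x4
-- block (else Position returns None and posisi[1] raises TypeError).
def Pre_Kurang (mtrx : List (List Int)) (num : Int) : Prop :=
  4 ≤ mtrx.length ∧ (∀ r ∈ mtrx.take 4, 4 ≤ r.length) ∧
    num ∈ (mtrx.take 4).flatMap (fun r => r.take 4)

instance (mtrx : List (List Int)) (num : Int) : Decidable (Pre_Kurang mtrx num) := by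
  unfold Pre_Kurang; infer_instance

def pvWitness_Kurang : List (List Int) × Int :=
  ([[1, 2, 3, 4], [5, 6, 7, 8], [9, 10, 11, 12], [13, 14, 15, 0]], 7)

def Spec_Kurang (mtrx : List (List Int)) (num : Int) (out : Int) : Prop := out = Kurang_alt mtrx num
instance (mtrx : List (List Int)) (num : Int) (out : Int) : Decidable (Spec_Kurang mtrx num out) := by unfold Spec_Kurang; infer_instance

-- ===== CLAIM (what is proved, stated in full; the proofs are below) =====
def Claim_equal_Kurang : Prop := ∀ (mtrx : List (List Int)) (num : Int), Dom_Kurang mtrx num → Pre_Kurang mtrx num → Spec_Kurang mtrx num (Kurang mtrx num)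


-- ===== LEMMAS AND PROOFS =====

theorem pairs_eq : ((List.range 4).flatMap (fun i => (List.range 4).map (fun j => (i, j)))) =
  [(0,0),(0,1),(0,2),(0,3),(1,0),(1,1),(1,2),(1,3),(2,0),(2,1),(2,2),(2,3),(3,0),(3,1),(3,2),(3,3)] := rfl

-- A's counting step as a function of the cell value
def addf (num : Int) : Int → Int → Int := fun c x => if num > x then c + 1 else c

-- once seen, B's fold counts exactly as A's counting fold
theorem stepTrue (num : Int) : ∀ (l : List Int) (c : Int),
    List.foldl (fun st x => stepB st num x) (true, c) l = (true, List.foldl (addf num) c l) := by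
  intro l
  induction l with
  | nil => intro c; rfl
  | cons x l ih =>
      intro c
      have hs : stepB (true, c) num x = (true, addf num c x) := by
        by_cases h : num > x <;> simp [stepB, addf, h]
      rw [List.foldl_cons, List.foldl_cons, hs, addf, ih]

-- before num is seen, B's fold leaves the state untouched
theorem stepFalse (num : Int) : ∀ (l : List Int) (c : Int), (∀ x ∈ l, ¬ x = num) →
    List.foldl (fun st x => stepB st num x) (false, c) l = (false, c) := by
  intro l
  induction l with
  | nil => intro c _; rfl
  | cons x l ih =>
      intro c h
      have hx : ¬ x = num := h x (by simp)
      have hs : stepB (false, c) num x = (false, c) := by simp [stepB, hx]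
      rw [List.foldl_cons, hs]
      exact ih c (fun y hy => h y (by simp [hy]))

-- A's count over the tail from num's position = B's flagged pass over the whole flat list
theorem bridge (num : Int) (pre suf : List Int) (h : ∀ x ∈ pre, ¬ x = num) :
    List.foldl (addf num) 0 (num :: suf)
  = (List.foldl (fun st x => stepB st num x) (false, 0) (pre ++ num :: suf)).2 := by
  rw [List.foldl_append, stepFalse num pre 0 h, List.foldl_cons, List.foldl_cons]
  have h1 : stepB (false, 0) num num = (true, 0) := by simp [stepB]
  have h2 : addf num 0 num = 0 := by simp [addf]
  rw [h1, h2, stepTrue]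

-- ===== VERDICT (by name: the statements are the Claim_ definitions above) =====
set_option maxHeartbeats 4000000 in
theorem Kurang_spec : Claim_equal_Kurang := by
  intro mtrx num _hdom hpre
  obtain ⟨hlen, hrows, hmem⟩ := hpre
  rcases mtrx with _ | ⟨r0, _ | ⟨r1, _ | ⟨r2, _ | ⟨r3, rest⟩⟩⟩⟩ <;> try (simp at hlen)
  have hl0 : 4 ≤ r0.length := hrows r0 (by simp)
  have hl1 : 4 ≤ r1.length := hrows r1 (by simp)
  have hl2 : 4 ≤ r2.length := hrows r2 (by simp)
  have hl3 : 4 ≤ r3.length := hrows r3 (by simp)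
  rcases r0 with _ | ⟨a0, _ | ⟨a1, _ | ⟨a2, _ | ⟨a3, t0⟩⟩⟩⟩ <;> try (simp at hl0)
  rcases r1 with _ | ⟨b0, _ | ⟨b1, _ | ⟨b2, _ | ⟨b3, t1⟩⟩⟩⟩ <;> try (simp at hl1)
  rcases r2 with _ | ⟨c0, _ | ⟨c1, _ | ⟨c2, _ | ⟨c3, t2⟩⟩⟩⟩ <;> try (simp at hl2)
  rcases r3 with _ | ⟨d0, _ | ⟨d1, _ | ⟨d2, _ | ⟨d3, t3⟩⟩⟩⟩ <;> try (simp at hl3)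
  · simp only [List.take, List.flatMap_cons, List.flatMap_nil, List.append_nil, List.cons_append,
      List.nil_append, List.mem_cons, List.not_mem_nil, or_false] at hmem
    by_cases h0 : num = a0
    · subst h0
      have hpos : Position ((num::a1::a2::a3::t0) :: (b0::b1::b2::b3::t1) :: (c0::c1::c2::c3::t2) :: (d0::d1::d2::d3::t3) :: rest) num = some (0,0) := by
        simp [Position, pairs_eq, cellA]
      unfold Spec_Kurang
      calc Kurang ((num::a1::a2::a3::t0) :: (b0::b1::b2::b3::t1) :: (c0::c1::c2::c3::t2) :: (d0::d1::d2::d3::t3) :: rest) num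
          = List.foldl (addf num) 0 (num :: [a1,a2,a3,b0,b1,b2,b3,c0,c1,c2,c3,d0,d1,d2,d3]) := by
            unfold Kurang; rw [hpos]; rfl
        _ = (List.foldl (fun st x => stepB st num x) (false, 0) ([] ++ num :: [a1,a2,a3,b0,b1,b2,b3,c0,c1,c2,c3,d0,d1,d2,d3])).2 := by
            refine bridge num _ _ ?_
            intro x hx; simp at hx
        _ = Kurang_alt ((num::a1::a2::a3::t0) :: (b0::b1::b2::b3::t1) :: (c0::c1::c2::c3::t2) :: (d0::d1::d2::d3::t3) :: rest) num := rfl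
    by_cases h1 : num = a1
    · subst h1
      have hpos : Position ((a0::num::a2::a3::t0) :: (b0::b1::b2::b3::t1) :: (c0::c1::c2::c3::t2) :: (d0::d1::d2::d3::t3) :: rest) num = some (0,1) := by
        simp [Position, pairs_eq, List.find?, cellA, h0]
      unfold Spec_Kurang
      calc Kurang ((a0::num::a2::a3::t0) :: (b0::b1::b2::b3::t1) :: (c0::c1::c2::c3::t2) :: (d0::d1::d2::d3::t3) :: rest) num
          = List.foldl (addf num) 0 (num :: [a2,a3,b0,b1,b2,b3,c0,c1,c2,c3,d0,d1,d2,d3]) := by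
            unfold Kurang; rw [hpos]; rfl
        _ = (List.foldl (fun st x => stepB st num x) (false, 0) ([a0] ++ num :: [a2,a3,b0,b1,b2,b3,c0,c1,c2,c3,d0,d1,d2,d3])).2 := by
            refine bridge num _ _ ?_
            intro x hx
            simp only [List.mem_cons, List.not_mem_nil, or_false] at hx
            rcases hx with rfl
            exacts [Ne.symm h0]
        _ = Kurang_alt ((a0::num::a2::a3::t0) :: (b0::b1::b2::b3::t1) :: (c0::c1::c2::c3::t2) :: (d0::d1::d2::d3::t3) :: rest) num := rfl
    by_cases h2 : num = a2
    · subst h2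
      have hpos : Position ((a0::a1::num::a3::t0) :: (b0::b1::b2::b3::t1) :: (c0::c1::c2::c3::t2) :: (d0::d1::d2::d3::t3) :: rest) num = some (0,2) := by
        simp [Position, pairs_eq, List.find?, cellA, h0, h1]
      unfold Spec_Kurang
      calc Kurang ((a0::a1::num::a3::t0) :: (b0::b1::b2::b3::t1) :: (c0::c1::c2::c3::t2) :: (d0::d1::d2::d3::t3) :: rest) num
          = List.foldl (addf num) 0 (num :: [a3,b0,b1,b2,b3,c0,c1,c2,c3,d0,d1,d2,d3]) := by
            unfold Kurang; rw [hpos]; rfl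
        _ = (List.foldl (fun st x => stepB st num x) (false, 0) ([a0,a1] ++ num :: [a3,b0,b1,b2,b3,c0,c1,c2,c3,d0,d1,d2,d3])).2 := by
            refine bridge num _ _ ?_
            intro x hx
            simp only [List.mem_cons, List.not_mem_nil, or_false] at hx
            rcases hx with rfl|rfl
            exacts [Ne.symm h0, Ne.symm h1]
        _ = Kurang_alt ((a0::a1::num::a3::t0) :: (b0::b1::b2::b3::t1) :: (c0::c1::c2::c3::t2) :: (d0::d1::d2::d3::t3) :: rest) num := rfl
    by_cases h3 : num = a3
    · subst h3
      have hpos : Position ((a0::a1::a2::num::t0) :: (b0::b1::b2::b3::t1) :: (c0::c1::c2::c3::t2) :: (d0::d1::d2::d3::t3) :: rest) num = some (0,3) := by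
        simp [Position, pairs_eq, List.find?, cellA, h0, h1, h2]
      unfold Spec_Kurang
      calc Kurang ((a0::a1::a2::num::t0) :: (b0::b1::b2::b3::t1) :: (c0::c1::c2::c3::t2) :: (d0::d1::d2::d3::t3) :: rest) num
          = List.foldl (addf num) 0 (num :: [b0,b1,b2,b3,c0,c1,c2,c3,d0,d1,d2,d3]) := by
            unfold Kurang; rw [hpos]; rfl
        _ = (List.foldl (fun st x => stepB st num x) (false, 0) ([a0,a1,a2] ++ num :: [b0,b1,b2,b3,c0,c1,c2,c3,d0,d1,d2,d3])).2 := by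
            refine bridge num _ _ ?_
            intro x hx
            simp only [List.mem_cons, List.not_mem_nil, or_false] at hx
            rcases hx with rfl|rfl|rfl
            exacts [Ne.symm h0, Ne.symm h1, Ne.symm h2]
        _ = Kurang_alt ((a0::a1::a2::num::t0) :: (b0::b1::b2::b3::t1) :: (c0::c1::c2::c3::t2) :: (d0::d1::d2::d3::t3) :: rest) num := rfl
    by_cases h4 : num = b0
    · subst h4
      have hpos : Position ((a0::a1::a2::a3::t0) :: (num::b1::b2::b3::t1) :: (c0::c1::c2::c3::t2) :: (d0::d1::d2::d3::t3) :: rest) num = some (1,0) := by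
        simp [Position, pairs_eq, List.find?, cellA, h0, h1, h2, h3]
      unfold Spec_Kurang
      calc Kurang ((a0::a1::a2::a3::t0) :: (num::b1::b2::b3::t1) :: (c0::c1::c2::c3::t2) :: (d0::d1::d2::d3::t3) :: rest) num
          = List.foldl (addf num) 0 (num :: [b1,b2,b3,c0,c1,c2,c3,d0,d1,d2,d3]) := by
            unfold Kurang; rw [hpos]; rfl
        _ = (List.foldl (fun st x => stepB st num x) (false, 0) ([a0,a1,a2,a3] ++ num :: [b1,b2,b3,c0,c1,c2,c3,d0,d1,d2,d3])).2 := by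
            refine bridge num _ _ ?_
            intro x hx
            simp only [List.mem_cons, List.not_mem_nil, or_false] at hx
            rcases hx with rfl|rfl|rfl|rfl
            exacts [Ne.symm h0, Ne.symm h1, Ne.symm h2, Ne.symm h3]
        _ = Kurang_alt ((a0::a1::a2::a3::t0) :: (num::b1::b2::b3::t1) :: (c0::c1::c2::c3::t2) :: (d0::d1::d2::d3::t3) :: rest) num := rfl
    by_cases h5 : num = b1
    · subst h5
      have hpos : Position ((a0::a1::a2::a3::t0) :: (b0::num::b2::b3::t1) :: (c0::c1::c2::c3::t2) :: (d0::d1::d2::d3::t3) :: rest) num = some (1,1) := by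
        simp [Position, pairs_eq, List.find?, cellA, h0, h1, h2, h3, h4]
      unfold Spec_Kurang
      calc Kurang ((a0::a1::a2::a3::t0) :: (b0::num::b2::b3::t1) :: (c0::c1::c2::c3::t2) :: (d0::d1::d2::d3::t3) :: rest) num
          = List.foldl (addf num) 0 (num :: [b2,b3,c0,c1,c2,c3,d0,d1,d2,d3]) := by
            unfold Kurang; rw [hpos]; rfl
        _ = (List.foldl (fun st x => stepB st num x) (false, 0) ([a0,a1,a2,a3,b0] ++ num :: [b2,b3,c0,c1,c2,c3,d0,d1,d2,d3])).2 := by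
            refine bridge num _ _ ?_
            intro x hx
            simp only [List.mem_cons, List.not_mem_nil, or_false] at hx
            rcases hx with rfl|rfl|rfl|rfl|rfl
            exacts [Ne.symm h0, Ne.symm h1, Ne.symm h2, Ne.symm h3, Ne.symm h4]
        _ = Kurang_alt ((a0::a1::a2::a3::t0) :: (b0::num::b2::b3::t1) :: (c0::c1::c2::c3::t2) :: (d0::d1::d2::d3::t3) :: rest) num := rfl
    by_cases h6 : num = b2
    · subst h6
      have hpos : Position ((a0::a1::a2::a3::t0) :: (b0::b1::num::b3::t1) :: (c0::c1::c2::c3::t2) :: (d0::d1::d2::d3::t3) :: rest) num = some (1,2) := by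
        simp [Position, pairs_eq, List.find?, cellA, h0, h1, h2, h3, h4, h5]
      unfold Spec_Kurang
      calc Kurang ((a0::a1::a2::a3::t0) :: (b0::b1::num::b3::t1) :: (c0::c1::c2::c3::t2) :: (d0::d1::d2::d3::t3) :: rest) num
          = List.foldl (addf num) 0 (num :: [b3,c0,c1,c2,c3,d0,d1,d2,d3]) := by
            unfold Kurang; rw [hpos]; rfl
        _ = (List.foldl (fun st x => stepB st num x) (false, 0) ([a0,a1,a2,a3,b0,b1] ++ num :: [b3,c0,c1,c2,c3,d0,d1,d2,d3])).2 := by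
            refine bridge num _ _ ?_
            intro x hx
            simp only [List.mem_cons, List.not_mem_nil, or_false] at hx
            rcases hx with rfl|rfl|rfl|rfl|rfl|rfl
            exacts [Ne.symm h0, Ne.symm h1, Ne.symm h2, Ne.symm h3, Ne.symm h4, Ne.symm h5]
        _ = Kurang_alt ((a0::a1::a2::a3::t0) :: (b0::b1::num::b3::t1) :: (c0::c1::c2::c3::t2) :: (d0::d1::d2::d3::t3) :: rest) num := rfl
    by_cases h7 : num = b3
    · subst h7
      have hpos : Position ((a0::a1::a2::a3::t0) :: (b0::b1::b2::num::t1) :: (c0::c1::c2::c3::t2) :: (d0::d1::d2::d3::t3) :: rest) num = some (1,3) := by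
        simp [Position, pairs_eq, List.find?, cellA, h0, h1, h2, h3, h4, h5, h6]
      unfold Spec_Kurang
      calc Kurang ((a0::a1::a2::a3::t0) :: (b0::b1::b2::num::t1) :: (c0::c1::c2::c3::t2) :: (d0::d1::d2::d3::t3) :: rest) num
          = List.foldl (addf num) 0 (num :: [c0,c1,c2,c3,d0,d1,d2,d3]) := by
            unfold Kurang; rw [hpos]; rfl
        _ = (List.foldl (fun st x => stepB st num x) (false, 0) ([a0,a1,a2,a3,b0,b1,b2] ++ num :: [c0,c1,c2,c3,d0,d1,d2,d3])).2 := by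
            refine bridge num _ _ ?_
            intro x hx
            simp only [List.mem_cons, List.not_mem_nil, or_false] at hx
            rcases hx with rfl|rfl|rfl|rfl|rfl|rfl|rfl
            exacts [Ne.symm h0, Ne.symm h1, Ne.symm h2, Ne.symm h3, Ne.symm h4, Ne.symm h5, Ne.symm h6]
        _ = Kurang_alt ((a0::a1::a2::a3::t0) :: (b0::b1::b2::num::t1) :: (c0::c1::c2::c3::t2) :: (d0::d1::d2::d3::t3) :: rest) num := rfl
    by_cases h8 : num = c0
    · subst h8
      have hpos : Position ((a0::a1::a2::a3::t0) :: (b0::b1::b2::b3::t1) :: (num::c1::c2::c3::t2) :: (d0::d1::d2::d3::t3) :: rest) num = some (2,0) := by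
        simp [Position, pairs_eq, List.find?, cellA, h0, h1, h2, h3, h4, h5, h6, h7]
      unfold Spec_Kurang
      calc Kurang ((a0::a1::a2::a3::t0) :: (b0::b1::b2::b3::t1) :: (num::c1::c2::c3::t2) :: (d0::d1::d2::d3::t3) :: rest) num
          = List.foldl (addf num) 0 (num :: [c1,c2,c3,d0,d1,d2,d3]) := by
            unfold Kurang; rw [hpos]; rfl
        _ = (List.foldl (fun st x => stepB st num x) (false, 0) ([a0,a1,a2,a3,b0,b1,b2,b3] ++ num :: [c1,c2,c3,d0,d1,d2,d3])).2 := by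
            refine bridge num _ _ ?_
            intro x hx
            simp only [List.mem_cons, List.not_mem_nil, or_false] at hx
            rcases hx with rfl|rfl|rfl|rfl|rfl|rfl|rfl|rfl
            exacts [Ne.symm h0, Ne.symm h1, Ne.symm h2, Ne.symm h3, Ne.symm h4, Ne.symm h5, Ne.symm h6, Ne.symm h7]
        _ = Kurang_alt ((a0::a1::a2::a3::t0) :: (b0::b1::b2::b3::t1) :: (num::c1::c2::c3::t2) :: (d0::d1::d2::d3::t3) :: rest) num := rfl
    by_cases h9 : num = c1
    · subst h9
      have hpos : Position ((a0::a1::a2::a3::t0) :: (b0::b1::b2::b3::t1) :: (c0::num::c2::c3::t2) :: (d0::d1::d2::d3::t3) :: rest) num = some (2,1) := by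
        simp [Position, pairs_eq, List.find?, cellA, h0, h1, h2, h3, h4, h5, h6, h7, h8]
      unfold Spec_Kurang
      calc Kurang ((a0::a1::a2::a3::t0) :: (b0::b1::b2::b3::t1) :: (c0::num::c2::c3::t2) :: (d0::d1::d2::d3::t3) :: rest) num
          = List.foldl (addf num) 0 (num :: [c2,c3,d0,d1,d2,d3]) := by
            unfold Kurang; rw [hpos]; rfl
        _ = (List.foldl (fun st x => stepB st num x) (false, 0) ([a0,a1,a2,a3,b0,b1,b2,b3,c0] ++ num :: [c2,c3,d0,d1,d2,d3])).2 := by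
            refine bridge num _ _ ?_
            intro x hx
            simp only [List.mem_cons, List.not_mem_nil, or_false] at hx
            rcases hx with rfl|rfl|rfl|rfl|rfl|rfl|rfl|rfl|rfl
            exacts [Ne.symm h0, Ne.symm h1, Ne.symm h2, Ne.symm h3, Ne.symm h4, Ne.symm h5, Ne.symm h6, Ne.symm h7, Ne.symm h8]
        _ = Kurang_alt ((a0::a1::a2::a3::t0) :: (b0::b1::b2::b3::t1) :: (c0::num::c2::c3::t2) :: (d0::d1::d2::d3::t3) :: rest) num := rfl
    by_cases h10 : num = c2
    · subst h10
      have hpos : Position ((a0::a1::a2::a3::t0) :: (b0::b1::b2::b3::t1) :: (c0::c1::num::c3::t2) :: (d0::d1::d2::d3::t3) :: rest) num = some (2,2) := by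
        simp [Position, pairs_eq, List.find?, cellA, h0, h1, h2, h3, h4, h5, h6, h7, h8, h9]
      unfold Spec_Kurang
      calc Kurang ((a0::a1::a2::a3::t0) :: (b0::b1::b2::b3::t1) :: (c0::c1::num::c3::t2) :: (d0::d1::d2::d3::t3) :: rest) num
          = List.foldl (addf num) 0 (num :: [c3,d0,d1,d2,d3]) := by
            unfold Kurang; rw [hpos]; rfl
        _ = (List.foldl (fun st x => stepB st num x) (false, 0) ([a0,a1,a2,a3,b0,b1,b2,b3,c0,c1] ++ num :: [c3,d0,d1,d2,d3])).2 := by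
            refine bridge num _ _ ?_
            intro x hx
            simp only [List.mem_cons, List.not_mem_nil, or_false] at hx
            rcases hx with rfl|rfl|rfl|rfl|rfl|rfl|rfl|rfl|rfl|rfl
            exacts [Ne.symm h0, Ne.symm h1, Ne.symm h2, Ne.symm h3, Ne.symm h4, Ne.symm h5, Ne.symm h6, Ne.symm h7, Ne.symm h8, Ne.symm h9]
        _ = Kurang_alt ((a0::a1::a2::a3::t0) :: (b0::b1::b2::b3::t1) :: (c0::c1::num::c3::t2) :: (d0::d1::d2::d3::t3) :: rest) num := rfl
    by_cases h11 : num = c3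
    · subst h11
      have hpos : Position ((a0::a1::a2::a3::t0) :: (b0::b1::b2::b3::t1) :: (c0::c1::c2::num::t2) :: (d0::d1::d2::d3::t3) :: rest) num = some (2,3) := by
        simp [Position, pairs_eq, List.find?, cellA, h0, h1, h2, h3, h4, h5, h6, h7, h8, h9, h10]
      unfold Spec_Kurang
      calc Kurang ((a0::a1::a2::a3::t0) :: (b0::b1::b2::b3::t1) :: (c0::c1::c2::num::t2) :: (d0::d1::d2::d3::t3) :: rest) num
          = List.foldl (addf num) 0 (num :: [d0,d1,d2,d3]) := by
            unfold Kurang; rw [hpos]; rfl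
        _ = (List.foldl (fun st x => stepB st num x) (false, 0) ([a0,a1,a2,a3,b0,b1,b2,b3,c0,c1,c2] ++ num :: [d0,d1,d2,d3])).2 := by
            refine bridge num _ _ ?_
            intro x hx
            simp only [List.mem_cons, List.not_mem_nil, or_false] at hx
            rcases hx with rfl|rfl|rfl|rfl|rfl|rfl|rfl|rfl|rfl|rfl|rfl
            exacts [Ne.symm h0, Ne.symm h1, Ne.symm h2, Ne.symm h3, Ne.symm h4, Ne.symm h5, Ne.symm h6, Ne.symm h7, Ne.symm h8, Ne.symm h9, Ne.symm h10]
        _ = Kurang_alt ((a0::a1::a2::a3::t0) :: (b0::b1::b2::b3::t1) :: (c0::c1::c2::num::t2) :: (d0::d1::d2::d3::t3) :: rest) num := rfl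
    by_cases h12 : num = d0
    · subst h12
      have hpos : Position ((a0::a1::a2::a3::t0) :: (b0::b1::b2::b3::t1) :: (c0::c1::c2::c3::t2) :: (num::d1::d2::d3::t3) :: rest) num = some (3,0) := by
        simp [Position, pairs_eq, List.find?, cellA, h0, h1, h2, h3, h4, h5, h6, h7, h8, h9, h10, h11]
      unfold Spec_Kurang
      calc Kurang ((a0::a1::a2::a3::t0) :: (b0::b1::b2::b3::t1) :: (c0::c1::c2::c3::t2) :: (num::d1::d2::d3::t3) :: rest) num
          = List.foldl (addf num) 0 (num :: [d1,d2,d3]) := by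
            unfold Kurang; rw [hpos]; rfl
        _ = (List.foldl (fun st x => stepB st num x) (false, 0) ([a0,a1,a2,a3,b0,b1,b2,b3,c0,c1,c2,c3] ++ num :: [d1,d2,d3])).2 := by
            refine bridge num _ _ ?_
            intro x hx
            simp only [List.mem_cons, List.not_mem_nil, or_false] at hx
            rcases hx with rfl|rfl|rfl|rfl|rfl|rfl|rfl|rfl|rfl|rfl|rfl|rfl
            exacts [Ne.symm h0, Ne.symm h1, Ne.symm h2, Ne.symm h3, Ne.symm h4, Ne.symm h5, Ne.symm h6, Ne.symm h7, Ne.symm h8, Ne.symm h9, Ne.symm h10, Ne.symm h11]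
        _ = Kurang_alt ((a0::a1::a2::a3::t0) :: (b0::b1::b2::b3::t1) :: (c0::c1::c2::c3::t2) :: (num::d1::d2::d3::t3) :: rest) num := rfl
    by_cases h13 : num = d1
    · subst h13
      have hpos : Position ((a0::a1::a2::a3::t0) :: (b0::b1::b2::b3::t1) :: (c0::c1::c2::c3::t2) :: (d0::num::d2::d3::t3) :: rest) num = some (3,1) := by
        simp [Position, pairs_eq, List.find?, cellA, h0, h1, h2, h3, h4, h5, h6, h7, h8, h9, h10, h11, h12]
      unfold Spec_Kurang
      calc Kurang ((a0::a1::a2::a3::t0) :: (b0::b1::b2::b3::t1) :: (c0::c1::c2::c3::t2) :: (d0::num::d2::d3::t3) :: rest) num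
          = List.foldl (addf num) 0 (num :: [d2,d3]) := by
            unfold Kurang; rw [hpos]; rfl
        _ = (List.foldl (fun st x => stepB st num x) (false, 0) ([a0,a1,a2,a3,b0,b1,b2,b3,c0,c1,c2,c3,d0] ++ num :: [d2,d3])).2 := by
            refine bridge num _ _ ?_
            intro x hx
            simp only [List.mem_cons, List.not_mem_nil, or_false] at hx
            rcases hx with rfl|rfl|rfl|rfl|rfl|rfl|rfl|rfl|rfl|rfl|rfl|rfl|rfl
            exacts [Ne.symm h0, Ne.symm h1, Ne.symm h2, Ne.symm h3, Ne.symm h4, Ne.symm h5, Ne.symm h6, Ne.symm h7, Ne.symm h8, Ne.symm h9, Ne.symm h10, Ne.symm h11, Ne.symm h12]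
        _ = Kurang_alt ((a0::a1::a2::a3::t0) :: (b0::b1::b2::b3::t1) :: (c0::c1::c2::c3::t2) :: (d0::num::d2::d3::t3) :: rest) num := rfl
    by_cases h14 : num = d2
    · subst h14
      have hpos : Position ((a0::a1::a2::a3::t0) :: (b0::b1::b2::b3::t1) :: (c0::c1::c2::c3::t2) :: (d0::d1::num::d3::t3) :: rest) num = some (3,2) := by
        simp [Position, pairs_eq, List.find?, cellA, h0, h1, h2, h3, h4, h5, h6, h7, h8, h9, h10, h11, h12, h13]
      unfold Spec_Kurang
      calc Kurang ((a0::a1::a2::a3::t0) :: (b0::b1::b2::b3::t1) :: (c0::c1::c2::c3::t2) :: (d0::d1::num::d3::t3) :: rest) num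
          = List.foldl (addf num) 0 (num :: [d3]) := by
            unfold Kurang; rw [hpos]; rfl
        _ = (List.foldl (fun st x => stepB st num x) (false, 0) ([a0,a1,a2,a3,b0,b1,b2,b3,c0,c1,c2,c3,d0,d1] ++ num :: [d3])).2 := by
            refine bridge num _ _ ?_
            intro x hx
            simp only [List.mem_cons, List.not_mem_nil, or_false] at hx
            rcases hx with rfl|rfl|rfl|rfl|rfl|rfl|rfl|rfl|rfl|rfl|rfl|rfl|rfl|rfl
            exacts [Ne.symm h0, Ne.symm h1, Ne.symm h2, Ne.symm h3, Ne.symm h4, Ne.symm h5, Ne.symm h6, Ne.symm h7, Ne.symm h8, Ne.symm h9, Ne.symm h10, Ne.symm h11, Ne.symm h12, Ne.symm h13]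
        _ = Kurang_alt ((a0::a1::a2::a3::t0) :: (b0::b1::b2::b3::t1) :: (c0::c1::c2::c3::t2) :: (d0::d1::num::d3::t3) :: rest) num := rfl
    by_cases h15 : num = d3
    · subst h15
      have hpos : Position ((a0::a1::a2::a3::t0) :: (b0::b1::b2::b3::t1) :: (c0::c1::c2::c3::t2) :: (d0::d1::d2::num::t3) :: rest) num = some (3,3) := by
        simp [Position, pairs_eq, List.find?, cellA, h0, h1, h2, h3, h4, h5, h6, h7, h8, h9, h10, h11, h12, h13, h14]
      unfold Spec_Kurang
      calc Kurang ((a0::a1::a2::a3::t0) :: (b0::b1::b2::b3::t1) :: (c0::c1::c2::c3::t2) :: (d0::d1::d2::num::t3) :: rest) num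
          = List.foldl (addf num) 0 (num :: []) := by
            unfold Kurang; rw [hpos]; rfl
        _ = (List.foldl (fun st x => stepB st num x) (false, 0) ([a0,a1,a2,a3,b0,b1,b2,b3,c0,c1,c2,c3,d0,d1,d2] ++ num :: [])).2 := by
            refine bridge num _ _ ?_
            intro x hx
            simp only [List.mem_cons, List.not_mem_nil, or_false] at hx
            rcases hx with rfl|rfl|rfl|rfl|rfl|rfl|rfl|rfl|rfl|rfl|rfl|rfl|rfl|rfl|rfl
            exacts [Ne.symm h0, Ne.symm h1, Ne.symm h2, Ne.symm h3, Ne.symm h4, Ne.symm h5, Ne.symm h6, Ne.symm h7, Ne.symm h8, Ne.symm h9, Ne.symm h10, Ne.symm h11, Ne.symm h12, Ne.symm h13, Ne.symm h14]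
        _ = Kurang_alt ((a0::a1::a2::a3::t0) :: (b0::b1::b2::b3::t1) :: (c0::c1::c2::c3::t2) :: (d0::d1::d2::num::t3) :: rest) num := rfl
    exact absurd hmem (by simp [h0, h1, h2, h3, h4, h5, h6, h7, h8, h9, h10, h11, h12, h13, h14, h15])
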